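-- pv_equiv track=rewrite | github.com/pypi-data/pypi-mirror-357 | packages/tablevault/tablevault-0.1.1.tar.gz/tablevault-0.1.1/tablevault/_helper/metadata_store.py | get_top_level_proccesses
-- ===== SOURCE A (Python) =====
-- def get_top_level_proccesses(active_ids) -> list[str]:
--     string_set = set(active_ids)
--     result = []
--     for s in active_ids:
--         parts = s.split("_")
--         is_shortest_prefix = True
--         for i in range(1, len(parts)):
--             prefix = "_".join(parts[:i])
--             if prefix in string_set:
--                 is_shortest_prefix = False
--                 break
--         if is_shortest_prefix:
--             result.append(s)
--     return result
-- ===== SOURCE B (Python) =====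
-- def get_top_level_proccesses(active_ids) -> list[str]:
--     # An id is top-level iff no active id is a proper prefix of it ending
--     # exactly at an underscore boundary.  Instead of rebuilding every
--     # underscore-prefix of s and hashing it, compare s pairwise against the
--     # other ids: t blocks s iff s starts with t and the next char is "_".
--     return [s for s in active_ids
--             if not any(len(t) < len(s) and s[len(t)] == "_" and s.startswith(t)
--                        for t in active_ids)]
-- ===== Notes on version B (the rewrite author's own statement) =====
-- stated objective: alternative
-- what changed: B removes A's set-of-ids and split('_')/join prefix reconstruction and instead inverts the quantifier: it scans the id list pairwise, keeping s iff no id t is a proper prefix of s whose next character is '_'.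
import Mathlib
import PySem

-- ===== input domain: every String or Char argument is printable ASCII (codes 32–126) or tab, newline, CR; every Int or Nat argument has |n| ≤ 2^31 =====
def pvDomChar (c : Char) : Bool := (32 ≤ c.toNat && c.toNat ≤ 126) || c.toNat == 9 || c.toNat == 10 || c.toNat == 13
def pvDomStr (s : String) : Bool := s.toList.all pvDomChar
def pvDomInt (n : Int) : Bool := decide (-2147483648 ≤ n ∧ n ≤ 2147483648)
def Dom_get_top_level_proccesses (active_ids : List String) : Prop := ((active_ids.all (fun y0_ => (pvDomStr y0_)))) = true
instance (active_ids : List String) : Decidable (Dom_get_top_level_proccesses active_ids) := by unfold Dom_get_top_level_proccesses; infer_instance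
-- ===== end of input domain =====

-- B drops A's set of ids and its split/join prefix reconstruction: it compares each id
-- pairwise against the list, keeping s iff no id t is a proper prefix of s followed by '_'
-- (objective: alternative — O(n^2) pairwise scans instead of hashed prefix lookups).

-- ===== PORT A =====
-- A's inner 'for i in range(1, len(parts))' loop with its break
def aPrefixLoop (string_set : PySem.Set String) (parts : List String) : List Int → Bool
  | [] => true
  | i :: rest =>
    let pre := PySem.Str.join "_" (PySem.List.slice parts none (some i))
    if PySem.Set.contains string_set pre then false
    else aPrefixLoop string_set parts rest

def get_top_level_proccesses (active_ids : List String) : List String :=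
  let string_set : PySem.Set String := PySem.Set.ofList active_ids
  active_ids.foldl (fun result s =>
    -- s.split("_"): the separator "_" is non-empty, so split? is always `some`
    let parts : List String := (PySem.Str.split? s "_").getD []
    let is_shortest_prefix :=
      aPrefixLoop string_set parts (PySem.List.pyRange 1 (parts.length : Int) 1)
    if is_shortest_prefix then result ++ [s] else result) []

-- ===== PORT B =====
def get_top_level_proccesses_alt (active_ids : List String) : List String :=
  active_ids.filter (fun s =>
    !(active_ids.any (fun t =>
        decide (PySem.Str.len t < PySem.Str.len s) &&
        (PySem.Str.pyGet? s (PySem.Str.len t) == some '_') &&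
        PySem.Str.startswith s t)))

-- ===== PRECONDITION & SPEC =====
def Spec_get_top_level_proccesses (active_ids : List String) (out : List String) : Prop := out = get_top_level_proccesses_alt active_ids
instance (active_ids : List String) (out : List String) : Decidable (Spec_get_top_level_proccesses active_ids out) := by unfold Spec_get_top_level_proccesses; infer_instance

-- ===== CLAIM (what is proved, stated in full; the proofs are below) =====
def Claim_equal_get_top_level_proccesses : Prop := ∀ (active_ids : List String), Dom_get_top_level_proccesses active_ids → Spec_get_top_level_proccesses active_ids (get_top_level_proccesses active_ids)

-- ===== LEMMAS AND PROOFS =====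

-- structural form of Python's s.split("_") on char lists
def mySplit : List Char → List (List Char)
  | [] => [[]]
  | c :: rest =>
    if c = '_' then [] :: mySplit rest
    else
      match mySplit rest with
      | [] => [[c]]
      | q :: qs => (c :: q) :: qs

-- the proper prefixes of cs that end just before an underscore, in position order
def uprefs : List Char → List (List Char)
  | [] => []
  | c :: rest =>
    if c = '_' then [] :: (uprefs rest).map (c :: ·)
    else (uprefs rest).map (c :: ·)

def glue (p : List Char) : List (List Char) → List (List Char)
  | [] => [p]
  | q :: qs => (p ++ q) :: qs

lemma mySplit_ne_nil (cs : List Char) : mySplit cs ≠ [] := by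
  cases cs with
  | nil => simp [mySplit]
  | cons c rest =>
    simp only [mySplit]; split
    · simp
    · split <;> simp

lemma glue_nil (ms : List (List Char)) (h : ms ≠ []) : glue [] ms = ms := by
  cases ms with
  | nil => exact absurd rfl h
  | cons q qs => simp [glue]

lemma go_eq (l cur : List Char) (acc : List (List Char)) (fuel : Nat) (h : l.length < fuel) :
    PySem.Chars.splitOn.go ['_'] fuel l cur acc = acc.reverse ++ glue cur.reverse (mySplit l) := by
  induction l generalizing fuel cur acc with
  | nil =>
    obtain ⟨f, rfl⟩ : ∃ f, fuel = f + 1 := ⟨fuel - 1, by omega⟩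
    rw [PySem.Chars.splitOn.go.eq_def]
    simp [mySplit, glue]
  | cons c rest ih =>
    obtain ⟨f, rfl⟩ : ∃ f, fuel = f + 1 := ⟨fuel - 1, by omega⟩
    rw [PySem.Chars.splitOn.go.eq_def]
    by_cases hc : c = '_'
    · subst hc
      simp only [List.isPrefixOf, Bool.and_true, beq_self_eq_true, if_pos, List.length_cons,
        List.drop_succ_cons, List.length_nil, List.drop_zero]
      rw [ih [] (List.reverse cur :: acc) f (by simp at h ⊢; omega)]
      simp [mySplit, glue]
      cases hms' : mySplit rest with
      | nil => exact absurd hms' (mySplit_ne_nil rest)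
      | cons q qs => rfl
    · have hpre : List.isPrefixOf ['_'] (c :: rest) = false := by
        simp [List.isPrefixOf, Ne.symm hc]
      simp only [hpre, Bool.false_eq_true, if_neg, not_false_iff]
      rw [ih (c :: cur) acc f (by simp at h ⊢; omega)]
      have hms := mySplit_ne_nil rest
      cases hms' : mySplit rest with
      | nil => exact absurd hms' hms
      | cons q qs =>
        simp [mySplit, hc, hms', glue, List.append_assoc]

lemma join_cons_char (c : Char) (q : List Char) (t : List (List Char)) :
    PySem.Chars.join ['_'] ((c :: q) :: t) = c :: PySem.Chars.join ['_'] (q :: t) := by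
  cases t with
  | nil => simp [PySem.Chars.join_singleton]
  | cons x xs => simp [PySem.Chars.join_cons_cons]

lemma join_nil_cons (xs : List Char) (t : List (List Char)) :
    PySem.Chars.join ['_'] ([] :: xs :: t) = '_' :: PySem.Chars.join ['_'] (xs :: t) := by
  simp [PySem.Chars.join_cons_cons]

lemma splitOn_eq_mySplit (cs : List Char) : PySem.Chars.splitOn cs ['_'] = mySplit cs := by
  unfold PySem.Chars.splitOn
  rw [go_eq cs [] [] (cs.length + 1) (by omega)]
  simp [glue_nil _ (mySplit_ne_nil cs)]

lemma crux (cs : List Char) :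
    (List.range ((mySplit cs).length - 1)).map
      (fun k => PySem.Chars.join ['_'] ((mySplit cs).take (k + 1))) = uprefs cs := by
  induction cs with
  | nil => simp [mySplit, uprefs]
  | cons c rest ih =>
    obtain ⟨q, qs, hms⟩ : ∃ q qs, mySplit rest = q :: qs := by
      cases h : mySplit rest with
      | nil => exact absurd h (mySplit_ne_nil rest)
      | cons q qs => exact ⟨q, qs, rfl⟩
    rw [hms] at ih
    by_cases hc : c = '_'
    · subst hc
      have h1 : mySplit ('_' :: rest) = [] :: q :: qs := by simp [mySplit, hms]
      rw [h1]
      simp only [List.length_cons, Nat.add_sub_cancel] at ih ⊢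
      rw [List.range_succ_eq_map, List.map_cons]
      simp only [uprefs, if_true]
      rw [List.cons_eq_cons]
      refine ⟨by simp [PySem.Chars.join_singleton], ?_⟩
      rw [← ih, List.map_map, List.map_map]
      refine List.map_congr_left (fun k _ => ?_)
      simp [List.take_succ_cons, join_nil_cons]
    · have h1 : mySplit (c :: rest) = (c :: q) :: qs := by simp [mySplit, hc, hms]
      rw [h1]
      simp only [uprefs, if_neg hc]
      simp only [List.length_cons, Nat.add_sub_cancel] at ih ⊢
      rw [← ih, List.map_map]
      refine List.map_congr_left (fun k _ => ?_)
      simp [List.take_succ_cons, join_cons_char]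

lemma aPrefixLoop_eq (sset : PySem.Set String) (parts : List String) (r : List Int) :
    aPrefixLoop sset parts r
      = !(r.any fun i => PySem.Set.contains sset
          (PySem.Str.join "_" (PySem.List.slice parts none (some i)))) := by
  induction r with
  | nil => simp [aPrefixLoop]
  | cons i rest ih =>
    simp only [aPrefixLoop, List.any_cons]
    split <;> rename_i hc
    · simp only [hc, Bool.true_or, Bool.not_true]
    · rw [Bool.not_eq_true] at hc
      simp only [hc, Bool.false_or, ih]

lemma split_parts (s : String) :
    ∃ ps, PySem.Str.split? s "_" = some ps ∧ ps.map String.toList = mySplit s.toList := by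
  have h := PySem.Str.split?_map s "_"
  rw [show "_".toList = ['_'] from rfl] at h
  unfold PySem.Chars.split? at h
  simp only [List.isEmpty_cons, if_false, Bool.false_eq_true] at h
  rw [splitOn_eq_mySplit] at h
  cases hx : PySem.Str.split? s "_" with
  | none => rw [hx] at h; simp at h
  | some ps =>
    rw [hx] at h
    simp only [Option.map_some, Option.some.injEq] at h
    exact ⟨ps, rfl, h⟩

-- per string: A's "is shortest prefix" flag is the negated scan of s's underscore-prefixes
lemma per_string (active_ids : List String) (s : String) :
    (let parts : List String := (PySem.Str.split? s "_").getD []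
     aPrefixLoop (PySem.Set.ofList active_ids) parts (PySem.List.pyRange 1 (parts.length : Int) 1))
      = !((uprefs s.toList).any
          (fun u => PySem.Set.contains (PySem.Set.ofList active_ids) (String.ofList u))) := by
  obtain ⟨ps, hsp, hmap⟩ := split_parts s
  simp only [hsp, Option.getD_some]
  rw [aPrefixLoop_eq]
  have hlen : ps.length = (mySplit s.toList).length := by
    rw [← hmap, List.length_map]
  congr 1
  rw [PySem.List.pyRange_one, List.any_map, ← crux s.toList, List.any_map]
  have hlen2 : (((ps.length : Int)) - 1).toNat = (mySplit s.toList).length - 1 := by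
    rw [hlen]; omega
  rw [hlen2]
  refine PySem.List.any_congr_mem (fun k _ => ?_)
  simp only [Function.comp]
  rw [PySem.List.slice_to ps (by omega : (0:Int) ≤ 1 + (k:Int))]
  have ht : ((1 : Int) + (k : Int)).toNat = k + 1 := by omega
  rw [ht]
  congr 1
  rw [← String.ofList_toList (s := PySem.Str.join "_" (List.take (k+1) ps))]
  congr 1
  rw [PySem.Str.toList_join, show "_".toList = ['_'] from rfl, List.map_take, hmap]

-- u ∈ uprefs cs iff u is a prefix of cs whose next character is '_'
lemma mem_uprefs (u cs : List Char) : u ∈ uprefs cs ↔ ∃ r, cs = u ++ '_' :: r := by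
  induction cs generalizing u with
  | nil =>
    simp only [uprefs, List.not_mem_nil, false_iff, not_exists]
    intro r h
    exact absurd h (by simp)
  | cons c rest ih =>
    by_cases hc : c = '_'
    · subst hc
      rw [show uprefs ('_' :: rest) = [] :: (uprefs rest).map ('_' :: ·) from by
        simp [uprefs]]
      simp only [List.mem_cons, List.mem_map]
      constructor
      · rintro (rfl | ⟨v, hv, rfl⟩)
        · exact ⟨rest, rfl⟩
        · obtain ⟨r, hr⟩ := (ih v).mp hv
          exact ⟨r, by simp [hr]⟩
      · rintro ⟨r, hr⟩
        cases u with
        | nil => exact Or.inl rfl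
        | cons a u' =>
          simp only [List.cons_append, List.cons.injEq] at hr
          exact Or.inr ⟨u', (ih u').mpr ⟨r, hr.2⟩, by rw [hr.1]⟩
    · simp only [uprefs, if_neg hc, List.mem_map]
      constructor
      · rintro ⟨v, hv, rfl⟩
        obtain ⟨r, hr⟩ := (ih v).mp hv
        exact ⟨r, by simp [hr]⟩
      · rintro ⟨r, hr⟩
        cases u with
        | nil =>
          simp only [List.nil_append, List.cons.injEq] at hr
          exact absurd hr.1 hc
        | cons a u' =>
          simp only [List.cons_append, List.cons.injEq] at hr
          exact ⟨u', (ih u').mpr ⟨r, hr.2⟩, by rw [hr.1]⟩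

-- B's pairwise test on (t, s) says exactly: t is an underscore-prefix of s
lemma cond_iff (t s : String) :
    (decide (PySem.Str.len t < PySem.Str.len s) &&
      (PySem.Str.pyGet? s (PySem.Str.len t) == some '_') &&
      PySem.Str.startswith s t) = true ↔ t.toList ∈ uprefs s.toList := by
  rw [mem_uprefs]
  simp only [Bool.and_eq_true, decide_eq_true_eq, beq_iff_eq, PySem.Str.len_eq,
    PySem.Str.pyGet?_eq, PySem.Str.startswith_eq, PySem.Chars.startswith_iff]
  constructor
  · rintro ⟨⟨hlt, hget⟩, r', hpre⟩
    rw [← hpre] at hlt hget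
    rw [show PySem.Chars.pyGet? (t.toList ++ r') (t.toList.length : Int)
          = PySem.List.pyGet? (t.toList ++ r') (t.toList.length : Int) from rfl,
        PySem.List.pyGet?_natCast] at hget
    rw [List.getElem?_append_right (le_refl _)] at hget
    simp only [Nat.sub_self] at hget
    cases r' with
    | nil => simp at hget
    | cons b r =>
      simp only [List.getElem?_cons_zero, Option.some.injEq] at hget
      exact ⟨r, by rw [← hpre, hget]⟩
  · rintro ⟨r, hs⟩
    rw [hs]
    refine ⟨⟨by simp, ?_⟩, ⟨'_' :: r, rfl⟩⟩
    rw [show PySem.Chars.pyGet? (t.toList ++ '_' :: r) (t.toList.length : Int)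
          = PySem.List.pyGet? (t.toList ++ '_' :: r) (t.toList.length : Int) from rfl,
        PySem.List.pyGet?_natCast, List.getElem?_append_right (le_refl _)]
    simp

-- exchanging the quantifier: scanning ids for an underscore-prefix of s equals
-- scanning s's underscore-prefixes for membership in the set of ids
lemma flags_eq (active_ids : List String) (s : String) :
    (active_ids.any (fun t =>
        decide (PySem.Str.len t < PySem.Str.len s) &&
        (PySem.Str.pyGet? s (PySem.Str.len t) == some '_') &&
        PySem.Str.startswith s t))
      = ((uprefs s.toList).any
          (fun u => PySem.Set.contains (PySem.Set.ofList active_ids) (String.ofList u))) := by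
  rw [Bool.eq_iff_iff]
  simp only [List.any_eq_true, cond_iff, PySem.Set.contains, List.contains_eq_mem,
    decide_eq_true_eq, PySem.Set.mem_ofList]
  constructor
  · rintro ⟨t, ht, hu⟩
    exact ⟨t.toList, hu, by rw [String.ofList_toList]; exact ht⟩
  · rintro ⟨u, hu, hmem⟩
    exact ⟨String.ofList u, hmem, by rw [String.toList_ofList]; exact hu⟩

-- ===== VERDICT (by name: the statement is the Claim_ definition above) =====
theorem get_top_level_proccesses_spec : Claim_equal_get_top_level_proccesses := by
  intro active_ids _
  unfold Spec_get_top_level_proccesses get_top_level_proccesses get_top_level_proccesses_alt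
  refine Eq.trans (b := List.foldl (fun (acc : List String) s =>
      if (aPrefixLoop (PySem.Set.ofList active_ids) ((PySem.Str.split? s "_").getD [])
          (PySem.List.pyRange 1 ((((PySem.Str.split? s "_").getD []).length : Nat) : Int) 1)) = true
      then acc ++ [id s] else acc) [] active_ids) rfl ?_
  rw [PySem.List.foldl_append_if]
  rw [List.map_id, List.nil_append]
  refine List.filter_congr (fun s _ => ?_)
  rw [per_string, flags_eq]
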